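-- pv_equiv track=rewrite | github.com/CSIRT-MU/IDEA-IDMEF-Converter | src/Converter/IdeaAndIdmefConverter/InnerConverterStructure/Helper/IdeaParsingHelper.py | correct_braces
-- ===== SOURCE A (Python) =====
-- def correct_braces(string):
--     """
--     Check if string has correct braces "{" and "}"
--
--     :param string: String with braces to be chekced
--     :return: true if braces are correct, otherwise false
--     """
--
--     if string is None:
--         raise ValueError("String to check correct braces was None")
--     braces_count = 0
--     quotation = False
--     for character in string:
--         if character == '{' and not quotation:
--             braces_count += 1
--         if character == '}' and not quotation:
--             braces_count -= 1
--         if character == '"':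
--             quotation = not quotation
--         if braces_count < 0:
--             return False
--     return braces_count == 0
-- ===== SOURCE B (Python) =====
-- def correct_braces(string):
--     if string is None:
--         raise ValueError("String to check correct braces was None")
--     count = 0
--     i = 0
--     n = len(string)
--     while i < n:
--         c = string[i]
--         if c == '"':
--             j = string.find('"', i + 1)
--             if j == -1:
--                 break  # unterminated quote: rest of string is ignored
--             i = j + 1
--             continue
--         if c == '{':
--             count += 1
--         elif c == '}':
--             count -= 1
--             if count < 0:
--                 return False
--         i += 1
--     return count == 0
-- ===== Notes on version B (the rewrite author's own statement) =====
-- stated objective: alternative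
-- what changed: Replaced A's per-character quotation flag with an index-jumping while-loop that skips each whole quoted span via str.find (breaking on an unterminated quote), keeping the brace counter and early False on negative balance.
import Mathlib
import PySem

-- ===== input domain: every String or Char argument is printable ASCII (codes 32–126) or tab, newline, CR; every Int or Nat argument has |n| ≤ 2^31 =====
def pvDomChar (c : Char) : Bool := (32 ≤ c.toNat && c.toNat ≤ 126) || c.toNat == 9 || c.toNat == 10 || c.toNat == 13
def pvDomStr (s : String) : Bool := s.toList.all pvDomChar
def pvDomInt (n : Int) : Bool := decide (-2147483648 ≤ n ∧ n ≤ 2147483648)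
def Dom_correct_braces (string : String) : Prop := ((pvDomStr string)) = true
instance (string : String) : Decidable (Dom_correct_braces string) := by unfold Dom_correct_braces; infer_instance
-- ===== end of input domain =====

-- B replaces A's per-character quotation flag by jump-based skipping of whole quoted
-- spans (find the closing quote and resume after it); objective: alternative decomposition,
-- same cost. (A's ValueError on None is outside the String type and not modelled.)

-- ===== PORT A =====
-- A's for-loop over the characters, state (braces_count, quotation), early `return False`.
def pvLoopA : List Char → Int → Bool → Bool
  | [], c, _ => c == 0
  | ch :: t, c, q =>
    let c1 := if ch = '{' && !q then c + 1 else c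
    let c2 := if ch = '}' && !q then c1 - 1 else c1
    let q' := if ch = '"' then !q else q
    if c2 < 0 then false else pvLoopA t c2 q'

def correct_braces (string : String) : Bool :=
  pvLoopA string.toList 0 false

-- ===== PORT B =====
-- Source B's `string.find('"', i+1)` ported as a scan for the closing quote, returning the
-- remainder after it (none = -1, i.e. unterminated quote → break).
def pvSkipQuote : List Char → Option (List Char)
  | [] => none
  | ch :: t => if ch = '"' then some t else pvSkipQuote t

theorem pvSkipQuote_len : ∀ (t r : List Char), pvSkipQuote t = some r → r.length ≤ t.length := by
  intro t
  induction t with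
  | nil => intro r h; simp [pvSkipQuote] at h
  | cons ch t ih =>
    intro r h
    by_cases hc : ch = '"'
    · simp [pvSkipQuote, hc] at h; subst h; exact Nat.le_succ _
    · simp [pvSkipQuote, hc] at h
      have := ih r h
      simp [List.length_cons]; omega

-- Source B's while-loop over the index, jumping past quoted spans.
def pvLoopB : List Char → Int → Bool
  | [], c => c == 0
  | ch :: t, c =>
    if ch = '"' then
      match h2 : pvSkipQuote t with
      | none => c == 0
      | some r => pvLoopB r c
    else if ch = '{' then pvLoopB t (c + 1)
    else if ch = '}' then
      if c - 1 < 0 then false else pvLoopB t (c - 1)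
    else pvLoopB t c
termination_by t _ => t.length
decreasing_by
  · exact Nat.lt_succ_of_le (pvSkipQuote_len _ _ h2)
  all_goals simp [List.length_cons]

def correct_braces_alt (string : String) : Bool :=
  pvLoopB string.toList 0

-- ===== PRECONDITION & SPEC =====
def Spec_correct_braces (string : String) (out : Bool) : Prop := out = correct_braces_alt string
instance (string : String) (out : Bool) : Decidable (Spec_correct_braces string out) := by unfold Spec_correct_braces; infer_instance

-- ===== CLAIM (what is proved, stated in full; the proofs are below) =====
def Claim_equal_correct_braces : Prop := ∀ (string : String), Dom_correct_braces string → Spec_correct_braces string (correct_braces string)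

-- ===== LEMMAS AND PROOFS =====

-- Inside a quotation, A's loop changes nothing until the closing quote: it equals
-- "skip to after the closing quote and continue unquoted" (or `c == 0` if none).
theorem pvLoopA_quoted : ∀ (t : List Char) (c : Int), 0 ≤ c →
    pvLoopA t c true = (match pvSkipQuote t with
                        | none => (c == 0)
                        | some r => pvLoopA r c false) := by
  intro t
  induction t with
  | nil => intro c hc; simp [pvLoopA, pvSkipQuote]
  | cons ch t ih =>
    intro c hc
    by_cases hq : ch = '"'
    · have : ¬ c < 0 := by omega
      simp [pvLoopA, pvSkipQuote, hq, this]
    · have hlt : ¬ c < 0 := by omega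
      have hstep : pvLoopA (ch :: t) c true = pvLoopA t c true := by
        simp [pvLoopA, hq, hlt]
      have hskip : pvSkipQuote (ch :: t) = pvSkipQuote t := by
        simp [pvSkipQuote, hq]
      rw [hstep, hskip]
      exact ih c hc

theorem pvLoopA_eq_B : ∀ (n : Nat) (t : List Char) (c : Int), t.length ≤ n → 0 ≤ c →
    pvLoopA t c false = pvLoopB t c := by
  intro n
  induction n with
  | zero =>
    intro t c hl _
    have : t = [] := List.eq_nil_of_length_eq_zero (Nat.le_zero.mp hl)
    subst this; simp [pvLoopA, pvLoopB]
  | succ n ih =>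
    intro t c hl hc
    cases t with
    | nil => simp [pvLoopA, pvLoopB]
    | cons ch t =>
      have hlt : t.length ≤ n := by simpa [List.length_cons] using hl
      by_cases hq : ch = '"'
      · -- quoted span: A toggles the flag, B jumps past the closing quote
        have hA : pvLoopA (ch :: t) c false = pvLoopA t c true := by
          have : ¬ c < 0 := by omega
          simp [pvLoopA, hq, this]
        rw [hA, pvLoopA_quoted t c hc]
        cases hs : pvSkipQuote t with
        | none =>
          simp only [pvLoopB, if_pos hq]
          split
          · rfl
          · simp_all
        | some r =>
          have hr : r.length ≤ n := le_trans (pvSkipQuote_len t r hs) hlt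
          simp only [pvLoopB, if_pos hq]
          split
          · simp_all
          · rename_i r' h2
            rw [hs] at h2
            cases h2
            exact ih r c hr hc
      · by_cases ho : ch = '{'
        · have : ¬ c + 1 < 0 := by omega
          simp [pvLoopA, pvLoopB, ho, hq, this, ih t (c + 1) hlt (by omega)]
        · by_cases hc2 : ch = '}'
          · by_cases hneg : c - 1 < 0
            · simp [pvLoopA, pvLoopB, hc2, ho, hq, hneg]
            · simp [pvLoopA, pvLoopB, hc2, ho, hq, hneg,
                    ih t (c - 1) hlt (by omega)]
          · have : ¬ c < 0 := by omega
            simp [pvLoopA, pvLoopB, hq, ho, hc2, this, ih t c hlt hc]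

-- ===== VERDICT (by name: the statement is the Claim_ definition above) =====
theorem correct_braces_spec : Claim_equal_correct_braces := by
  intro s _
  unfold Spec_correct_braces correct_braces correct_braces_alt
  exact pvLoopA_eq_B s.toList.length s.toList 0 le_rfl (by omega)
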